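-- pv_equiv track=rewrite | github.com/fluent93/stt_app | stt.py | _strip_leading_content_chars
-- ===== SOURCE A (Python) =====
-- def _strip_leading_content_chars(raw: str, n: int) -> str:
--     """공백은 건너뛰며 앞에서부터 비공백 문자 n개 분량을 제거."""
--     if n <= 0:
--         return raw
--     seen = 0
--     i = 0
--     while i < len(raw) and seen < n:
--         if not raw[i].isspace():
--             seen += 1
--         i += 1
--     while i < len(raw) and raw[i].isspace():
--         i += 1
--     return raw[i:]
-- ===== SOURCE B (Python) =====
-- def _strip_leading_content_chars(raw: str, n: int) -> str:
--     if n <= 0: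
--         return raw
--     pos = [i for i, ch in enumerate(raw) if not ch.isspace()]
--     if n > len(pos):
--         return ''
--     return raw[pos[n - 1] + 1:].lstrip()
-- ===== Notes on version B (the rewrite author's own statement) =====
-- stated objective: simpler
-- what changed: Replaces A's two early-stopping while loops (count non-space chars, then skip spaces) with a precomputed index table of non-space positions, one slice at pos[n-1]+1 and lstrip().
import Mathlib
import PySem

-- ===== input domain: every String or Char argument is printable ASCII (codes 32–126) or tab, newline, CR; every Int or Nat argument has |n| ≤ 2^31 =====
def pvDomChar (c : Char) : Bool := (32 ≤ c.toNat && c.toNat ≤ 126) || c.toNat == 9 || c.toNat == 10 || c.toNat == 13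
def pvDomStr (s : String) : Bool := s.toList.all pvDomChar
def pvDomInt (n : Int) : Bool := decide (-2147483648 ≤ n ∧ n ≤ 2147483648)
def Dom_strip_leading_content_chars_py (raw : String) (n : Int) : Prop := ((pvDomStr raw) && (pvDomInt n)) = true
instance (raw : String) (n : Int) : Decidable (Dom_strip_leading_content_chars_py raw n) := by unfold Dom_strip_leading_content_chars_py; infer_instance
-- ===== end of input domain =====

-- B replaces A's two character-counting while loops by an index table of the non-space
-- positions plus one slice and lstrip (objective: simpler; same cost).

-- ===== PORT A =====
-- first while loop: advance over the chars, counting non-space ones, until n are seen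
def pvA_loop1 : List Char → Int → Int → List Char
  | [], _, _ => []
  | c :: rest, seen, n =>
      if seen < n then
        pvA_loop1 rest (if PySem.Chars.isspace c = false then seen + 1 else seen) n
      else c :: rest

-- second while loop: skip the following spaces
def pvA_loop2 : List Char → List Char
  | [] => []
  | c :: rest => if PySem.Chars.isspace c then pvA_loop2 rest else c :: rest

def strip_leading_content_chars_py (raw : String) (n : Int) : String :=
  if n ≤ 0 then raw
  else String.ofList (pvA_loop2 (pvA_loop1 raw.toList 0 n))

-- ===== PORT B =====
def strip_leading_content_chars_py_alt (raw : String) (n : Int) : String :=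
  if n ≤ 0 then raw
  else
    let pos : List Int := (PySem.List.enumerate raw.toList).filterMap
      (fun p => if PySem.Chars.isspace p.2 = false then some p.1 else none)
    if (pos.length : Int) < n then ""
    else
      -- pos[n-1] is in range in this branch, so getD 0 is exact for Python's pos[n-1]
      PySem.Str.lstrip (String.ofList
        (PySem.List.slice raw.toList (some ((PySem.List.pyGet? pos (n - 1)).getD 0 + 1)) none))

-- ===== PRECONDITION & SPEC =====
def Spec_strip_leading_content_chars_py (raw : String) (n : Int) (out : String) : Prop := out = strip_leading_content_chars_py_alt raw n
instance (raw : String) (n : Int) (out : String) : Decidable (Spec_strip_leading_content_chars_py raw n out) := by unfold Spec_strip_leading_content_chars_py; infer_instance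

-- ===== CLAIM (what is proved, stated in full; the proofs are below) =====
def Claim_equal_strip_leading_content_chars_py : Prop := ∀ (raw : String) (n : Int), Dom_strip_leading_content_chars_py raw n → Spec_strip_leading_content_chars_py raw n (strip_leading_content_chars_py raw n)

-- ===== LEMMAS AND PROOFS =====

-- proof-side reformulation of A's first loop: remaining count of non-space chars to drop
def pvG : List Char → Nat → List Char
  | l, 0 => l
  | [], _ + 1 => []
  | c :: rest, k + 1 => pvG rest (if PySem.Chars.isspace c then k + 1 else k)

-- proof-side recursive characterisation of the non-space index table
def pvPosR : List Char → List Nat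
  | [] => []
  | c :: rest =>
      if PySem.Chars.isspace c then (pvPosR rest).map (· + 1)
      else 0 :: (pvPosR rest).map (· + 1)

lemma pvA_loop1_eq_pvG (l : List Char) : ∀ seen n : Int,
    pvA_loop1 l seen n = pvG l (n - seen).toNat := by
  induction l with
  | nil => intro seen n; cases h : (n - seen).toNat <;> simp [pvA_loop1, pvG]
  | cons c rest ih =>
    intro seen n
    by_cases hlt : seen < n
    · by_cases hs : PySem.Chars.isspace c
      · have hk : (n - seen).toNat = (n - seen - 1).toNat + 1 := by omega
        rw [show pvA_loop1 (c :: rest) seen n = pvA_loop1 rest seen n by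
              simp [pvA_loop1, hlt, hs]]
        rw [ih, hk]
        simp [pvG, hs]
      · have hk : (n - seen).toNat = (n - (seen + 1)).toNat + 1 := by omega
        rw [show pvA_loop1 (c :: rest) seen n = pvA_loop1 rest (seen + 1) n by
              simp [pvA_loop1, hlt, hs]]
        rw [ih, hk]
        simp [pvG, hs]
    · have : (n - seen).toNat = 0 := by omega
      simp [pvA_loop1, hlt, this, pvG]

lemma pvA_loop2_eq_dropWhile (l : List Char) :
    pvA_loop2 l = l.dropWhile PySem.Chars.isspace := by
  induction l with
  | nil => simp [pvA_loop2]
  | cons c rest ih =>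
    by_cases hs : PySem.Chars.isspace c <;> simp [pvA_loop2, hs, List.dropWhile, ih]

lemma enumerate_shift {α : Type} (l : List α) : ∀ s : Int,
    PySem.List.enumerate l (s + 1) =
      (PySem.List.enumerate l s).map (fun p => (p.1 + 1, p.2)) := by
  induction l with
  | nil => intro s; simp [PySem.List.enumerate_nil]
  | cons c rest ih => intro s; simp [PySem.List.enumerate_cons, ih (s + 1)]

-- B's enumerate/filterMap table is pvPosR, cast to Int
lemma pos_eq_pvPosR (l : List Char) :
    (PySem.List.enumerate l).filterMap
        (fun p => if PySem.Chars.isspace p.2 = false then some p.1 else none)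
      = (pvPosR l).map (fun k : Nat => (k : Int)) := by
  induction l with
  | nil => simp [PySem.List.enumerate_nil, pvPosR]
  | cons c rest ih =>
    rw [PySem.List.enumerate_cons, enumerate_shift rest 0, List.filterMap_cons,
        List.filterMap_map]
    have hcomp : ((fun p : Int × Char => if PySem.Chars.isspace p.2 = false then some p.1 else none)
          ∘ (fun p : Int × Char => (p.1 + 1, p.2)))
        = fun p : Int × Char =>
            Option.map (· + 1) (if PySem.Chars.isspace p.2 = false then some p.1 else none) := by
      funext p; by_cases h : PySem.Chars.isspace p.2 <;> simp [h, Function.comp]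
    rw [hcomp, ← List.map_filterMap, ih, List.map_map]
    have hmaps : ((pvPosR rest).map (fun k : Nat => (k : Int))).map (· + 1)
        = ((pvPosR rest).map (· + 1)).map (fun k : Nat => (k : Int)) := by
      rw [List.map_map, List.map_map]
      exact List.map_congr_left (fun k _ => by simp [Function.comp])
    by_cases hs : PySem.Chars.isspace c
    · rw [show pvPosR (c :: rest) = (pvPosR rest).map (· + 1) by simp [pvPosR, hs], ← hmaps]
      simp [hs]
    · rw [show pvPosR (c :: rest) = 0 :: (pvPosR rest).map (· + 1) by simp [pvPosR, hs]]
      rw [List.map_cons, ← hmaps]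
      simp [hs]

-- the core: A's loops equal B's table-index-then-drop, for a positive count k+1
lemma core (l : List Char) : ∀ k : Nat,
    pvA_loop2 (pvG l (k + 1)) =
      if (pvPosR l).length < k + 1 then []
      else pvA_loop2 (l.drop ((pvPosR l).getD k 0 + 1)) := by
  induction l with
  | nil => intro k; simp [pvG, pvPosR, pvA_loop2]
  | cons c rest ih =>
    intro k
    by_cases hs : PySem.Chars.isspace c
    · have hlen : (pvPosR (c :: rest)).length = (pvPosR rest).length := by simp [pvPosR, hs]
      by_cases hL : (pvPosR rest).length < k + 1
      · simp [pvG, hs, pvPosR, ih k, hL]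
      · have hk : k < (pvPosR rest).length := by omega
        have hget : (pvPosR (c :: rest)).getD k 0 = (pvPosR rest).getD k 0 + 1 := by
          simp [pvPosR, hs, List.getD_eq_getElem?_getD, List.getElem?_map,
                List.getElem?_eq_getElem hk]
        rw [show pvG (c :: rest) (k + 1) = pvG rest (k + 1) by simp [pvG, hs]]
        rw [ih k, hget]
        simp [hL, hlen, List.drop_succ_cons]
    · cases k with
      | zero =>
        have : pvG (c :: rest) 1 = pvG rest 0 := by simp [pvG, hs]
        simp [pvG, pvPosR, hs, List.drop_succ_cons]
      | succ j =>
        have hlen : (pvPosR (c :: rest)).length = (pvPosR rest).length + 1 := by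
          simp [pvPosR, hs]
        by_cases hL : (pvPosR rest).length < j + 1
        · have : pvG (c :: rest) (j + 2) = pvG rest (j + 1) := by simp [pvG, hs]
          rw [this, ih j]
          simp [hL, hlen]
          omega
        · have hj : j < (pvPosR rest).length := by omega
          have hget : (pvPosR (c :: rest)).getD (j + 1) 0 = (pvPosR rest).getD j 0 + 1 := by
            simp [pvPosR, hs, List.getD_eq_getElem?_getD, List.getElem?_map,
                  List.getElem?_eq_getElem hj]
          have hstep : pvG (c :: rest) (j + 2) = pvG rest (j + 1) := by simp [pvG, hs]
          rw [hstep, ih j, hget]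
          simp [hL, hlen, List.drop_succ_cons]
          omega

lemma lstrip_mk (cs : List Char) :
    PySem.Str.lstrip (String.ofList cs) = String.ofList (pvA_loop2 cs) := by
  rw [pvA_loop2_eq_dropWhile]
  simp [PySem.Str.lstrip, PySem.Chars.lstrip]

-- ===== VERDICT (by name: the statement is the Claim_ definition above) =====
theorem strip_leading_content_chars_py_spec : Claim_equal_strip_leading_content_chars_py := by
  intro raw n _
  show strip_leading_content_chars_py raw n = strip_leading_content_chars_py_alt raw n
  unfold strip_leading_content_chars_py strip_leading_content_chars_py_alt
  by_cases hn : n ≤ 0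
  · simp [hn]
  · simp only [hn, if_false]
    rw [pos_eq_pvPosR]
    set l := raw.toList
    obtain ⟨k, hk⟩ : ∃ k : Nat, n.toNat = k + 1 := ⟨n.toNat - 1, by omega⟩
    have hn0 : n - 0 = n := by ring
    rw [pvA_loop1_eq_pvG, hn0, hk, core l k]
    by_cases hL : (pvPosR l).length < k + 1
    · have : ((((pvPosR l).map (fun k : Nat => (k : Int))).length : Int)) < n := by
        rw [List.length_map]; omega
      rw [if_pos hL, if_pos this]
    · have hk' : k < (pvPosR l).length := by omega
      have hnlt : ¬ ((((pvPosR l).map (fun k : Nat => (k : Int))).length : Int) < n) := by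
        rw [List.length_map]; omega
      have hidx : n - 1 = ((k : Nat) : Int) := by omega
      rw [if_neg hL, if_neg hnlt, hidx, PySem.List.pyGet?_natCast]
      have hget : ((pvPosR l).map (fun k : Nat => (k : Int)))[k]? = some (((pvPosR l).getD k 0 : Nat) : Int) := by
        simp [List.getElem?_map, List.getD_eq_getElem?_getD, List.getElem?_eq_getElem hk']
      rw [hget]
      have hcast : ((((pvPosR l).getD k 0 : Nat) : Int)) + 1 = (((pvPosR l).getD k 0 + 1 : Nat) : Int) := by
        push_cast; ring
      rw [Option.getD_some, hcast, PySem.List.slice_from_natCast, lstrip_mk]
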